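-- pv_equiv track=rewrite | github.com/daniel-d-truong/coding-solutions | cssi-practice/cssi-7-anagrams/find_anagrams.py | string_contains_anagram
-- ===== SOURCE A (Python) =====
-- def string_contains_anagram(string_a, string_b):
--     big_phrase_lower = string_a.lower()
--     small_phrase_lower = string_b.lower()
--
--     big_phrase_list = big_phrase_lower.split(" ")
--     small_phrase_list = small_phrase_lower.split(" ")
--
--     words_dict = {}
--
--
--     for i in range(len(small_phrase_list)):
--         for ch in big_phrase_list[i]:
--             if ch not in words_dict.keys():
--                 words_dict[ch] = 1
--             else:
--                 words_dict[ch]+=1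
--
--
--     for i in range(len(small_phrase_list)):
--         for ch in small_phrase_list[i]:
--             if ch not in words_dict.keys():
--                 return False
--             else:
--                 words_dict[ch]-=1
--                 if words_dict[ch] < 0:
--                     return False
--
--     return True
-- ===== SOURCE B (Python) =====
-- def string_contains_anagram(string_a, string_b):
--     big_words = string_a.lower().split(" ")
--     small_words = string_b.lower().split(" ")
--     k = len(small_words)
--     big_sorted = sorted("".join(big_words[:k]))
--     small_sorted = sorted("".join(small_words))
--     # small's chars fit in big's iff, after sorting, small is a subsequence of big
--     it = iter(big_sorted)
--     return all(ch in it for ch in small_sorted)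
-- ===== Notes on version B (the rewrite author's own statement) =====
-- stated objective: alternative
-- what changed: Replaced the incremental dict decrement-and-early-return scan by sort-then-merge: sort the chars of the first k big words and the chars of the small phrase, then check the sorted small char list is a subsequence of the sorted big char list with one iterator sweep (no counting table at all).
-- crash fix: When string_b splits into more space-separated words than string_a, A raises IndexError on big_phrase_list[i]; B slices big_words[:k] and returns the containment answer. — e.g. on string_contains_anagram("ab", "x y"): A raises IndexError, B returns false
import Mathlib
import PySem

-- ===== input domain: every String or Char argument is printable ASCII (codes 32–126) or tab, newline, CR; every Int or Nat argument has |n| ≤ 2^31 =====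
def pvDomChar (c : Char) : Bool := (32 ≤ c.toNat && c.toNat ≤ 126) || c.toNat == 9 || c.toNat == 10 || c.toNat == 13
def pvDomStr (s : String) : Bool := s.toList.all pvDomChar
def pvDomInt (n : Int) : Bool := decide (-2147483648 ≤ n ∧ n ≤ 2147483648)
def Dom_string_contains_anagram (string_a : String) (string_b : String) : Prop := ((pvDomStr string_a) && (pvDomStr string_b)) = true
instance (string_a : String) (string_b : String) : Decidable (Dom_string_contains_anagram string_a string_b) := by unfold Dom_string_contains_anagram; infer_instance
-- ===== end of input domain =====

-- B replaces A's incremental dict decrement-and-early-return scan by sort-then-merge: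
-- sort both char sequences and do one subsequence sweep; proved equal wherever A
-- returns (Pre_), and where A raises IndexError (more small words than big) B returns.

-- ===== PORT A =====
-- 'if ch not in words_dict: words_dict[ch] = 1 else: words_dict[ch] += 1'
def sca_step1 (d : PySem.Dict Char Int) (ch : Char) : PySem.Dict Char Int :=
  if d.contains ch = false then d.insert ch 1 else d.insert ch (d.getD ch 0 + 1)

-- second loop body: 'return False' is modelled as none
def sca_step2 (d : PySem.Dict Char Int) (ch : Char) : Option (PySem.Dict Char Int) :=
  if d.contains ch = false then none
  else
    let d' := d.insert ch (d.getD ch 0 - 1)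
    if d'.getD ch 0 < 0 then none else some d'

def string_contains_anagram (string_a : String) (string_b : String) : Bool :=
  let bigList := (PySem.Str.split? (PySem.Str.lower string_a) " ").getD []
  let smallList := (PySem.Str.split? (PySem.Str.lower string_b) " ").getD []
  -- first loop: for i in range(len(small)): for ch in big[i]: …  (none = IndexError)
  let d1 : Option (PySem.Dict Char Int) :=
    (PySem.List.pyRange 0 (PySem.List.len smallList)).foldl
      (fun od i => od.bind fun d => (PySem.List.pyGet? bigList i).bind fun w =>
        some (w.toList.foldl sca_step1 d)) (some PySem.Dict.empty)
  match d1 with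
  | none => false  -- IndexError; excluded by Pre_
  | some d0 =>
    -- second loop: for i in range(len(small)): for ch in small[i]: …
    let d2 : Option (PySem.Dict Char Int) :=
      (PySem.List.pyRange 0 (PySem.List.len smallList)).foldl
        (fun od i => od.bind fun d => (PySem.List.pyGet? smallList i).bind fun w =>
          w.toList.foldl (fun o ch => o.bind (sca_step2 · ch)) (some d)) (some d0)
    d2.isSome

-- ===== PORT B =====
-- 'it = iter(big_sorted); all(ch in it for ch in small_sorted)': each 'ch in it'
-- consumes the iterator until it yields ch (False if exhausted) — the classic
-- Python subsequence test, transcribed as a two-list recursion.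
def sca_subseq (small : List Char) (big : List Char) : Bool :=
  match small, big with
  | [], _ => true
  | _ :: _, [] => false
  | x :: s, y :: b => if y = x then sca_subseq s b else sca_subseq (x :: s) b

def string_contains_anagram_alt (string_a : String) (string_b : String) : Bool :=
  let bigWords := (PySem.Str.split? (PySem.Str.lower string_a) " ").getD []
  let smallWords := (PySem.Str.split? (PySem.Str.lower string_b) " ").getD []
  let k := PySem.List.len smallWords
  let bigSorted := PySem.List.sorted
    (PySem.Str.join "" (PySem.List.slice bigWords none (some k))).toList (fun c => c)
  let smallSorted := PySem.List.sorted (PySem.Str.join "" smallWords).toList (fun c => c)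
  sca_subseq smallSorted bigSorted

-- ===== PRECONDITION & SPEC =====
-- Pre_ excludes exactly the inputs where A raises IndexError: string_b (lowered)
-- splits into more space-separated words than string_a.
def Pre_string_contains_anagram (string_a : String) (string_b : String) : Prop :=
  ((PySem.Str.split? (PySem.Str.lower string_b) " ").getD []).length ≤
    ((PySem.Str.split? (PySem.Str.lower string_a) " ").getD []).length
instance (string_a : String) (string_b : String) : Decidable (Pre_string_contains_anagram string_a string_b) := by unfold Pre_string_contains_anagram; infer_instance

def pvWitness_string_contains_anagram : String × String := ("Dog cat", "cot a")

-- When string_b splits into more space-separated words than string_a, A raises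
-- IndexError on big_phrase_list[i]; B slices big_words[:k] and returns the answer.
def Raises_string_contains_anagram (string_a : String) (string_b : String) : Prop :=
  ((PySem.Str.split? (PySem.Str.lower string_a) " ").getD []).length <
    ((PySem.Str.split? (PySem.Str.lower string_b) " ").getD []).length
instance (string_a : String) (string_b : String) : Decidable (Raises_string_contains_anagram string_a string_b) := by unfold Raises_string_contains_anagram; infer_instance

def pvRaiseWitness_string_contains_anagram : String × String := ("ab", "x y")
def pvRaiseWitnessOut_string_contains_anagram : Bool := false

def Spec_string_contains_anagram (string_a : String) (string_b : String) (out : Bool) : Prop := out = string_contains_anagram_alt string_a string_b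
instance (string_a : String) (string_b : String) (out : Bool) : Decidable (Spec_string_contains_anagram string_a string_b out) := by unfold Spec_string_contains_anagram; infer_instance

-- ===== CLAIM (what is proved, stated in full; the proofs are below) =====
def Claim_equal_string_contains_anagram : Prop := ∀ (string_a : String) (string_b : String), Dom_string_contains_anagram string_a string_b → Pre_string_contains_anagram string_a string_b → Spec_string_contains_anagram string_a string_b (string_contains_anagram string_a string_b)

def Claim_raises_string_contains_anagram : Prop := (∀ (string_a : String) (string_b : String), Dom_string_contains_anagram string_a string_b → Raises_string_contains_anagram string_a string_b → ¬ Pre_string_contains_anagram string_a string_b) ∧ (Dom_string_contains_anagram (pvRaiseWitness_string_contains_anagram.1) (pvRaiseWitness_string_contains_anagram.2) ∧ Raises_string_contains_anagram (pvRaiseWitness_string_contains_anagram.1) (pvRaiseWitness_string_contains_anagram.2) ∧ string_contains_anagram_alt (pvRaiseWitness_string_contains_anagram.1) (pvRaiseWitness_string_contains_anagram.2) = pvRaiseWitnessOut_string_contains_anagram)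

-- ===== LEMMAS AND PROOFS =====

-- a once-failed second loop stays failed
theorem sca_foldl2_none (L : List Char) :
    L.foldl (fun o ch => o.bind (sca_step2 · ch)) none = none := by
  induction L with
  | nil => rfl
  | cons x T ih => simpa using ih

theorem sca_step2_spec (L : List Char) :
    ∀ (d : PySem.Dict Char Int),
      (L.foldl (fun o ch => o.bind (sca_step2 · ch)) (some d)).isSome =
        decide (∀ ch ∈ L, ∃ v, d.get? ch = some v ∧ (L.count ch : Int) ≤ v) := by
  induction L with
  | nil => intro d; simp
  | cons x T ih =>
    intro d
    rw [List.foldl_cons]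
    rw [show ((some d).bind fun d' => sca_step2 d' x) = sca_step2 d x from rfl]
    cases hv : d.get? x with
    | none =>
      have hc : d.contains x = false := by rw [PySem.Dict.contains_eq_isSome_get?, hv]; rfl
      rw [show sca_step2 d x = none by simp [sca_step2, hc], sca_foldl2_none]
      symm
      simp only [Option.isSome_none]
      rw [decide_eq_false_iff_not]
      intro h
      obtain ⟨w, hw, _⟩ := h x List.mem_cons_self
      rw [hv] at hw
      simp at hw
    | some v =>
      have hc : d.contains x = true := by rw [PySem.Dict.contains_eq_isSome_get?, hv]; rfl
      have hgd : d.getD x 0 = v := by rw [PySem.Dict.getD_eq_get?_getD, hv]; rfl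
      by_cases hneg : v - 1 < 0
      · rw [show sca_step2 d x = none by
            simp [sca_step2, hc, hgd, hneg], sca_foldl2_none]
        symm
        simp only [Option.isSome_none]
        rw [decide_eq_false_iff_not]
        intro h
        obtain ⟨w, hw, hcw⟩ := h x List.mem_cons_self
        rw [hv] at hw
        injection hw with hw
        subst hw
        rw [List.count_cons_self] at hcw
        push_cast at hcw
        omega
      · rw [show sca_step2 d x = some (d.insert x (v - 1)) by
            simp [sca_step2, hc, hgd, hneg], ih]
        rw [decide_eq_decide]
        constructor
        · intro h ch hch
          by_cases hcx : ch = x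
          · subst hcx
            refine ⟨v, hv, ?_⟩
            rw [List.count_cons_self]
            by_cases hxT : ch ∈ T
            · obtain ⟨w, hw, hcw⟩ := h ch hxT
              rw [PySem.Dict.get?_insert_self] at hw
              injection hw with hw
              subst hw
              push_cast
              omega
            · rw [List.count_eq_zero_of_not_mem hxT]
              push_cast
              omega
          · rcases List.mem_cons.mp hch with h1 | h1
            · exact absurd h1 hcx
            obtain ⟨w, hw, hcw⟩ := h ch h1
            rw [PySem.Dict.get?_insert_of_ne _ _ hcx] at hw
            have hxc : ¬ x = ch := fun hh => hcx hh.symm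
            refine ⟨w, hw, ?_⟩
            simpa [List.count_cons, hxc] using hcw
        · intro h ch hch
          by_cases hcx : ch = x
          · subst hcx
            obtain ⟨w, hw, hcw⟩ := h ch List.mem_cons_self
            rw [hv] at hw
            injection hw with hw
            subst hw
            refine ⟨v - 1, PySem.Dict.get?_insert_self _ _ _, ?_⟩
            rw [List.count_cons_self] at hcw
            push_cast at hcw ⊢
            omega
          · obtain ⟨w, hw, hcw⟩ := h ch (List.mem_cons_of_mem _ hch)
            have hxc : ¬ x = ch := fun hh => hcx hh.symm
            refine ⟨w, by rw [PySem.Dict.get?_insert_of_ne _ _ hcx]; exact hw, ?_⟩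
            simpa [List.count_cons, hxc] using hcw

theorem sca_foldl2_bind (L : List Char) (od : Option (PySem.Dict Char Int)) :
    od.bind (fun d => L.foldl (fun o ch => o.bind (sca_step2 · ch)) (some d)) =
      L.foldl (fun o ch => o.bind (sca_step2 · ch)) od := by
  cases od with
  | none => simpa using (sca_foldl2_none L).symm
  | some d => rfl

-- a range-driven indexing loop is a loop over the prefix of the list
theorem sca_rangeFold {α β : Type} (xs : List α) (g : β → α → Option β) :
    ∀ (k j : Nat) (ob : Option β), j + k ≤ xs.length →
      (PySem.List.pyRange (j : Int) ((j : Int) + (k : Int))).foldl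
        (fun od i => od.bind fun d => (PySem.List.pyGet? xs i).bind fun w => g d w) ob
      = ((xs.drop j).take k).foldl (fun od w => od.bind (fun d => g d w)) ob := by
  intro k
  induction k with
  | zero =>
    intro j ob h
    simp [PySem.List.pyRange]
  | succ k ih =>
    intro j ob h
    have hj : j < xs.length := by omega
    rw [PySem.List.pyRange_one_cons (by push_cast; omega)]
    have hdrop : xs.drop j = xs[j] :: xs.drop (j+1) := (List.getElem_cons_drop hj).symm
    rw [hdrop]
    simp only [List.take_succ_cons, List.foldl_cons]
    have : ((j:Int) + 1) = ((j+1 : Nat) : Int) := by push_cast; ring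
    rw [show (j:Int) + ((k:Nat)+1 : Nat) = ((j+1:Nat):Int) + (k:Int) by push_cast; ring, this]
    rw [ih (j+1) _ (by omega)]
    congr 1
    rw [PySem.List.pyGet?_natCast, List.getElem?_eq_getElem hj]
    rfl

theorem sca_nil_case (d : PySem.Dict Char Int) (ch : Char) :
      d.get? ch =
        if d.contains ch = false ∧ (0:Nat) = 0 then none
        else some (d.getD ch 0 + ((0:Nat) : Int)) := by
  cases hv : d.get? ch with
  | none =>
    have : d.contains ch = false := by rw [PySem.Dict.contains_eq_isSome_get?, hv]; rfl
    simp [this]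
  | some v =>
    have hc : d.contains ch = true := by rw [PySem.Dict.contains_eq_isSome_get?, hv]; rfl
    simp [hc, PySem.Dict.getD_eq_get?_getD, hv]

theorem sca_step1_spec (L : List Char) :
    ∀ (d : PySem.Dict Char Int) (ch : Char),
      (L.foldl sca_step1 d).get? ch =
        if d.contains ch = false ∧ L.count ch = 0 then none
        else some (d.getD ch 0 + (L.count ch : Int)) := by
  induction L with
  | nil => intro d ch; simpa using sca_nil_case d ch
  | cons x T ih =>
    intro d ch
    rw [List.foldl_cons, ih]
    unfold sca_step1
    by_cases hx : d.contains x = false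
    · rw [if_pos hx]
      by_cases hcx : ch = x
      · subst hcx
        simp
        rw [PySem.Dict.getD_of_not_contains _ _ hx]
        ring
      · have hxc : ¬ x = ch := fun h => hcx h.symm
        simp [PySem.Dict.contains_insert, PySem.Dict.getD_insert, hcx, hxc]
    · rw [if_neg hx]
      have hxt : d.contains x = true := by
        cases h : d.contains x with
        | false => exact absurd h hx
        | true => rfl
      by_cases hcx : ch = x
      · subst hcx
        simp
        ring
      · have hxc : ¬ x = ch := fun h => hcx h.symm
        simp [PySem.Dict.contains_insert, PySem.Dict.getD_insert, hcx, hxc]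

-- "".join over char-lists is flatten
theorem sca_join_nil (css : List (List Char)) :
    PySem.Chars.join [] css = css.flatten := by
  induction css with
  | nil => simp [PySem.Chars.join_nil]
  | cons p rest ih =>
    cases rest with
    | nil => simp [PySem.Chars.join_singleton]
    | cons q rest' => simp [PySem.Chars.join_cons_cons, ih]

theorem sca_join_toList (ws : List String) :
    (PySem.Str.join "" ws).toList = ws.flatMap String.toList := by
  rw [PySem.Str.toList_join]
  rw [show ("" : String).toList = [] from rfl, sca_join_nil, List.flatten_eq_flatMap, List.flatMap_map]
  rfl

-- an all-some word fold collapses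
theorem sca_someFold (ws : List String) :
    ∀ (d : PySem.Dict Char Int),
      ws.foldl (fun od w => od.bind fun d => some (w.toList.foldl sca_step1 d)) (some d) =
        some (ws.foldl (fun d w => w.toList.foldl sca_step1 d) d) := by
  induction ws with
  | nil => intro d; rfl
  | cons w ws ih => intro d; simpa using ih _

-- the option-threaded word loop is the char loop over the flattened words
theorem sca_wordFold2 (ws : List String) :
    ∀ (od : Option (PySem.Dict Char Int)),
      ws.foldl (fun od w => od.bind fun d =>
          w.toList.foldl (fun o ch => o.bind (sca_step2 · ch)) (some d)) od =
        (ws.flatMap String.toList).foldl (fun o ch => o.bind (sca_step2 · ch)) od := by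
  induction ws with
  | nil => intro od; rfl
  | cons w ws ih =>
    intro od
    rw [List.foldl_cons, sca_foldl2_bind, ih, List.flatMap_cons, List.foldl_append]

theorem sca_rangeFold0 {α β : Type} (xs : List α) (g : β → α → Option β) (k : Nat)
    (ob : Option β) (h : k ≤ xs.length) :
    (PySem.List.pyRange 0 ((k : Nat) : Int)).foldl
        (fun od i => od.bind fun d => (PySem.List.pyGet? xs i).bind fun w => g d w) ob
      = (xs.take k).foldl (fun od w => od.bind (fun d => g d w)) ob := by
  have h' := sca_rangeFold xs g k 0 ob (by simpa using h)
  simpa using h'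

-- both sides compute multiset containment of the char lists
theorem sca_A_spec (big small : List String) (h : small.length ≤ big.length) :
    (let d1 : Option (PySem.Dict Char Int) :=
      (PySem.List.pyRange 0 (PySem.List.len small)).foldl
        (fun od i => od.bind fun d => (PySem.List.pyGet? big i).bind fun w =>
          some (w.toList.foldl sca_step1 d)) (some PySem.Dict.empty)
     match d1 with
     | none => false
     | some d0 =>
       ((PySem.List.pyRange 0 (PySem.List.len small)).foldl
        (fun od i => od.bind fun d => (PySem.List.pyGet? small i).bind fun w =>
          w.toList.foldl (fun o ch => o.bind (sca_step2 · ch)) (some d)) (some d0)).isSome)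
    = decide (∀ ch ∈ small.flatMap String.toList,
        ((small.flatMap String.toList).count ch : Int) ≤ (((big.take small.length).flatMap String.toList).count ch : Int)) := by
  have e1 : PySem.List.len small = ((small.length : Nat) : Int) := rfl
  simp only [e1]
  rw [sca_rangeFold0 big (fun d w => some (w.toList.foldl sca_step1 d)) small.length
      (some PySem.Dict.empty) h]
  rw [sca_someFold]
  show ((PySem.List.pyRange 0 ((small.length : Nat) : Int)).foldl
      (fun od i => od.bind fun d => (PySem.List.pyGet? small i).bind fun w =>
        w.toList.foldl (fun o ch => o.bind (sca_step2 · ch)) (some d))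
      (some ((big.take small.length).foldl (fun d w => w.toList.foldl sca_step1 d)
        PySem.Dict.empty))).isSome
    = decide (∀ ch ∈ small.flatMap String.toList,
        ((small.flatMap String.toList).count ch : Int) ≤
          (((big.take small.length).flatMap String.toList).count ch : Int))
  rw [sca_rangeFold0 small
      (fun d w => w.toList.foldl (fun o ch => o.bind (sca_step2 · ch)) (some d)) small.length
      _ le_rfl]
  rw [List.take_length, sca_wordFold2, sca_step2_spec]
  rw [show ((big.take small.length).foldl (fun d w => w.toList.foldl sca_step1 d)
        PySem.Dict.empty)
      = ((big.take small.length).flatMap String.toList).foldl sca_step1 PySem.Dict.empty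
    from List.foldl_flatMap.symm]
  rw [decide_eq_decide]
  constructor
  · intro H ch hch
    obtain ⟨v, hv, hle⟩ := H ch hch
    rw [sca_step1_spec] at hv
    simp only [PySem.Dict.contains_empty, PySem.Dict.getD_empty, zero_add, true_and] at hv
    by_cases hb : ((big.take small.length).flatMap String.toList).count ch = 0
    · rw [if_pos hb] at hv
      exact absurd hv (by simp)
    · rw [if_neg hb] at hv
      injection hv with hv
      omega
  · intro H ch hch
    have hpos : 0 < (small.flatMap String.toList).count ch := List.count_pos_iff.mpr hch
    have hle := H ch hch
    rw [sca_step1_spec]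
    simp only [PySem.Dict.contains_empty, PySem.Dict.getD_empty, zero_add, true_and]
    by_cases hb : ((big.take small.length).flatMap String.toList).count ch = 0
    · omega
    · exact ⟨_, by rw [if_neg hb], hle⟩

-- the greedy iterator sweep decides the Sublist relation
theorem sca_subseq_iff_sublist (small big : List Char) :
    sca_subseq small big = true ↔ small.Sublist big := by
  induction big generalizing small with
  | nil =>
    cases small with
    | nil => simp [sca_subseq]
    | cons x s => simp [sca_subseq]
  | cons y b ih =>
    cases small with
    | nil => simp [sca_subseq]
    | cons x s =>
      by_cases hxy : y = x
      · subst hxy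
        rw [show sca_subseq (y :: s) (y :: b) = sca_subseq s b by simp [sca_subseq], ih]
        exact (List.cons_sublist_cons).symm
      · rw [show sca_subseq (x :: s) (y :: b) = sca_subseq (x :: s) b by
            simp [sca_subseq, hxy], ih]
        constructor
        · exact fun h => h.cons y
        · intro h
          cases h with
          | cons _ h => exact h
          | cons₂ => exact absurd rfl hxy

-- for sorted lists, Sublist coincides with multiset containment
theorem sca_sorted_sublist_iff (u v : List Char) (hu : u.Pairwise (· ≤ ·))
    (hv : v.Pairwise (· ≤ ·)) :
    u.Sublist v ↔ ∀ ch ∈ u, u.count ch ≤ v.count ch := by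
  constructor
  · intro h ch _; exact h.count_le ch
  · intro h
    exact List.sublist_of_subperm_of_sortedLE (List.subperm_ext_iff.mpr h)
      hu.sortedLE hv.sortedLE

theorem sca_B_spec (big small : List String) :
    sca_subseq
      (PySem.List.sorted (PySem.Str.join "" small).toList (fun c => c))
      (PySem.List.sorted
        (PySem.Str.join "" (PySem.List.slice big none (some (PySem.List.len small)))).toList
        (fun c => c))
    = decide (∀ ch ∈ small.flatMap String.toList,
        ((small.flatMap String.toList).count ch : Int) ≤ (((big.take small.length).flatMap String.toList).count ch : Int)) := by
  have hslice : PySem.List.slice big none (some (PySem.List.len small)) = big.take small.length := by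
    rw [show PySem.List.len small = ((small.length : Nat) : Int) from rfl,
      PySem.List.slice_to_natCast]
  rw [hslice, sca_join_toList, sca_join_toList]
  set sC := small.flatMap String.toList with hsC
  set bC := (big.take small.length).flatMap String.toList with hbC
  have hps : (PySem.List.sorted sC (fun c => c) false).Perm sC := PySem.List.sorted_perm _ _ _
  have hpb : (PySem.List.sorted bC (fun c => c) false).Perm bC := PySem.List.sorted_perm _ _ _
  have hsrt_s : (PySem.List.sorted sC (fun c => c) false).Pairwise (· ≤ ·) :=
    PySem.List.sorted_pairwise _ _
  have hsrt_b : (PySem.List.sorted bC (fun c => c) false).Pairwise (· ≤ ·) :=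
    PySem.List.sorted_pairwise _ _
  rw [Bool.eq_iff_iff, sca_subseq_iff_sublist, sca_sorted_sublist_iff _ _ hsrt_s hsrt_b,
    decide_eq_true_iff]
  constructor
  · intro H ch hch
    have := H ch ((hps.mem_iff).mpr hch)
    rw [hps.count_eq, hpb.count_eq] at this
    exact_mod_cast this
  · intro H ch hch
    rw [hps.count_eq, hpb.count_eq]
    have := H ch ((hps.mem_iff).mp hch)
    exact_mod_cast this

-- ===== VERDICT (by name: the statement is the Claim_ definition above) =====
theorem string_contains_anagram_spec : Claim_equal_string_contains_anagram := by
  intro sa sb _ hpre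
  unfold Spec_string_contains_anagram
  unfold string_contains_anagram string_contains_anagram_alt
  rw [sca_A_spec _ _ hpre, sca_B_spec]

@[simp] theorem string_contains_anagram_raises : Claim_raises_string_contains_anagram := by
  unfold Claim_raises_string_contains_anagram
  constructor
  · intro sa sb _ hr hp
    unfold Raises_string_contains_anagram at hr
    unfold Pre_string_contains_anagram at hp
    omega
  · exact ⟨by decide, by decide, by decide⟩
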